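-- pv_equiv track=rewrite | github.com/is-hoku/EDSAC-Simulator | common.py | int_to_bits
-- ===== SOURCE A (Python) =====
-- def int_to_bits(n, width):  # 10進数の n を width bit の配列に2進数(2の補数表現)に変換
--     w = bin(2**width - 1)
--     b = bin(n & int(w, 2))
--     length = len(b) - 2
--     binary = []
--     for i in range(length):
--         binary.insert(0, int(b[i+2]))
--     result = [0] * (width - len(binary))
--     binary.reverse()
--     result.extend(binary)
--     return result
-- ===== SOURCE B (Python) =====
-- def int_to_bits(n, width):  # width-bit two's complement, arithmetic bit extraction
--     masked = n & (2**width - 1)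
--     bits = []
--     for _ in range(width):
--         bits.append(masked & 1)
--         masked >>= 1
--     bits.reverse()
--     return bits
-- ===== Notes on version B (the rewrite author's own statement) =====
-- stated objective: alternative
-- what changed: B extracts the two's-complement bits arithmetically (mask with n & (2**width - 1), then width iterations of &1 / >>=1, reversed at the end) instead of formatting with bin(), re-parsing the mask string with int(w,2) and building the digit list with insert(0, ...).
-- intended difference: For width == 0 A returns [0] (an accident of bin(0) being '0b0') while B returns [], the intended zero-length bit array for a width-0 field. — e.g. on int_to_bits(5, 0): A returns [0], B returns []
import Mathlib
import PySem

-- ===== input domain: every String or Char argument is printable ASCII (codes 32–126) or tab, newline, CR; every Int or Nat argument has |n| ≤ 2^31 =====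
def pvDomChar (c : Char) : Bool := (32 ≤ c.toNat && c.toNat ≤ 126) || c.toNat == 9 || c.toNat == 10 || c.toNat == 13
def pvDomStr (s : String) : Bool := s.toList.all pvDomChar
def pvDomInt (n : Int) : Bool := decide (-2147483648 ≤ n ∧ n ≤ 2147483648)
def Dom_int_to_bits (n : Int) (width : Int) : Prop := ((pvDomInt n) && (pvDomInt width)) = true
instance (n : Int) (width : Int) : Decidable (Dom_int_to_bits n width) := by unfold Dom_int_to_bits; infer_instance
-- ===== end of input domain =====

-- B replaces A's bin()-string formatting/parsing and quadratic insert(0,..) digit list by an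
-- arithmetic &1 / >>=1 extraction loop over range(width); A = B is proved for every width ≥ 1
-- (Python A raises TypeError for width < 0, hence Pre_), and at width = 0 the intended
-- difference ([0] vs []) is stated and proved exact.

-- ===== PORT A =====
-- int(s, 2) restricted to the "0b…" strings produced by bin() of a NONNEGATIVE int — the only
-- strings A ever feeds it (bin(2**width - 1) with width ≥ 0): drop the "0b" prefix and fold the
-- binary digits.  Exact there (no sign, no spaces, no underscores occur).
def parseBin2 (cs : List Char) : Int :=
  (cs.drop 2).foldl (fun a c => 2 * a + ((c.toNat : Int) - 48)) 0

-- the strings are ported at the char-list level (PySem.Str operations are defined over List Char);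
-- PySem.Int.toBinChars0b m = (bin(m)).toList.
def int_to_bits (n : Int) (width : Int) : List Int :=
  let w := PySem.Int.toBinChars0b ((2 : Int) ^ width.toNat - 1)  -- w = bin(2**width - 1); width < 0 raises in Python (outside Pre_)
  let b := PySem.Int.toBinChars0b (PySem.Int.band n (parseBin2 w))  -- b = bin(n & int(w, 2))
  let length : Int := (b.length : Int) - 2
  -- for i in range(length): binary.insert(0, int(b[i+2]))
  -- b[i+2] is always in range and a single binary digit, so the two getD defaults are never used
  let binary : List Int := (PySem.List.pyRange 0 length 1).foldl
    (fun bin i =>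
      PySem.List.insert bin 0 ((PySem.Int.ofChars? [(PySem.List.pyGet? b (i + 2)).getD '0']).getD 0)) []
  let result : List Int := List.replicate (width - (binary.length : Int)).toNat 0  -- [0] * k, [] for k ≤ 0
  result ++ binary.reverse

-- ===== PORT B =====
def int_to_bits_alt (n : Int) (width : Int) : List Int :=
  let masked := PySem.Int.band n ((2 : Int) ^ width.toNat - 1)  -- n & (2**width - 1)
  -- for _ in range(width): bits.append(masked & 1); masked >>= 1
  let st := (PySem.List.pyRange 0 width 1).foldl
    (fun (st : List Int × Int) _ => (st.1 ++ [PySem.Int.band st.2 1], st.2 >>> (1 : Nat))) ([], masked)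
  st.1.reverse

-- ===== PRECONDITION & SPEC =====
-- Python A raises TypeError for width < 0 (2**width is a float there); everything else returns.
def Pre_int_to_bits (n : Int) (width : Int) : Prop := 0 ≤ width
instance (n : Int) (width : Int) : Decidable (Pre_int_to_bits n width) := by unfold Pre_int_to_bits; infer_instance
def pvWitness_int_to_bits : Int × Int := (5, 4)
-- For width == 0 A returns [0] (an accident of bin(0) being '0b0') while B returns [],
-- the intended zero-length bit array for a width-0 field.
def D_int_to_bits (n : Int) (width : Int) : Prop := width = 0
instance (n : Int) (width : Int) : Decidable (D_int_to_bits n width) := by unfold D_int_to_bits; infer_instance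
def Spec_int_to_bits (n : Int) (width : Int) (out : List Int) : Prop := ¬ D_int_to_bits n width → out = int_to_bits_alt n width
instance (n : Int) (width : Int) (out : List Int) : Decidable (Spec_int_to_bits n width out) := by unfold Spec_int_to_bits; infer_instance
def pvDiffWitness_int_to_bits : Int × Int := (5, 0)
def pvDiffWitnessOut_int_to_bits : (List Int) × (List Int) := ([0], [])

-- ===== CLAIM (what is proved, stated in full; the proofs are below) =====
def Claim_unchanged_int_to_bits : Prop := ∀ (n : Int) (width : Int), Dom_int_to_bits n width → Pre_int_to_bits n width → Spec_int_to_bits n width (int_to_bits n width)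
def Claim_changed_int_to_bits : Prop := Dom_int_to_bits (pvDiffWitness_int_to_bits.1) (pvDiffWitness_int_to_bits.2) ∧ Pre_int_to_bits (pvDiffWitness_int_to_bits.1) (pvDiffWitness_int_to_bits.2) ∧ D_int_to_bits (pvDiffWitness_int_to_bits.1) (pvDiffWitness_int_to_bits.2) ∧ int_to_bits (pvDiffWitness_int_to_bits.1) (pvDiffWitness_int_to_bits.2) = pvDiffWitnessOut_int_to_bits.1 ∧ int_to_bits_alt (pvDiffWitness_int_to_bits.1) (pvDiffWitness_int_to_bits.2) = pvDiffWitnessOut_int_to_bits.2 ∧ pvDiffWitnessOut_int_to_bits.1 ≠ pvDiffWitnessOut_int_to_bits.2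
def Claim_exact_int_to_bits : Prop := ∀ (n : Int) (width : Int), Dom_int_to_bits n width → Pre_int_to_bits n width → D_int_to_bits n width → int_to_bits n width ≠ int_to_bits_alt n width

-- ===== LEMMAS AND PROOFS =====

-- MSB-first binary digit characters of a natural number (binDig 0 = ['0'], like bin()).
def binDig (m : Nat) : List Char :=
  if m < 2 then [Nat.digitChar m] else binDig (m / 2) ++ [Nat.digitChar (m % 2)]
decreasing_by exact Nat.div_lt_self (by omega) (by omega)

-- the digit value A's loop body extracts from one character
def dval (c : Char) : Int := (PySem.Int.ofChars? [c]).getD 0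

theorem toDigitsCore_eq_binDig : ∀ (f m : Nat) (acc : List Char), m < f →
    Nat.toDigitsCore 2 f m acc = binDig m ++ acc := by
  intro f
  induction f with
  | zero => omega
  | succ f ih =>
    intro m acc hm
    rw [Nat.toDigitsCore]
    by_cases h2 : m / 2 = 0
    · simp only [h2]
      rw [binDig, if_pos (by omega : m < 2)]
      have : m % 2 = m := by omega
      rw [this]; rfl
    · simp only [if_neg h2]
      have hlt : m / 2 < m := Nat.div_lt_self (by omega) (by omega)
      rw [ih (m / 2) _ (by omega)]
      conv_rhs => rw [binDig]
      rw [if_neg (by omega : ¬ m < 2)]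
      simp

theorem toDigits_eq_binDig (m : Nat) : Nat.toDigits 2 m = binDig m := by
  rw [Nat.toDigits, toDigitsCore_eq_binDig _ _ _ (by omega)]; simp

theorem parse_binDig (m : Nat) (a : Int) :
    (binDig m).foldl (fun a c => 2 * a + ((c.toNat : Int) - 48)) a
      = a * 2 ^ (binDig m).length + m := by
  induction m using binDig.induct generalizing a with
  | case1 m h =>
    rw [binDig, if_pos h]
    interval_cases m <;> simp [Nat.digitChar] <;> ring
  | case2 m h ih =>
    rw [binDig, if_neg h]
    simp only [List.foldl_append, List.foldl_cons, List.foldl_nil, List.length_append,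
      List.length_cons, List.length_nil, ih]
    have h2 : ((m % 2).digitChar.toNat : Int) - 48 = (m % 2 : Nat) := by
      rcases Nat.mod_two_eq_zero_or_one m with h' | h' <;> rw [h'] <;> decide
    have hm2 : (m : Int) = 2 * ((m / 2 : Nat) : Int) + ((m % 2 : Nat) : Int) := by omega
    rw [h2, pow_succ, hm2]; ring

theorem dval_digitChar (r : Nat) (h : r < 2) : dval (Nat.digitChar r) = (r : Int) := by
  interval_cases r <;> decide

theorem one_le_binDig_length (m : Nat) : 1 ≤ (binDig m).length := by
  rw [binDig]; split <;> simp

theorem main_bits : ∀ (K m : Nat), 1 ≤ K → m < 2 ^ K →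
    ((List.range K).map (fun j => ((m / 2 ^ j % 2 : Nat) : Int))).reverse
      = List.replicate (K - (binDig m).length) 0 ++ (binDig m).map dval := by
  intro K
  induction K with
  | zero => omega
  | succ K ih =>
    intro m hK hm
    by_cases hK0 : K = 0
    · subst hK0
      have hm2 : m < 2 := by omega
      rw [binDig, if_pos hm2]
      interval_cases m <;> simp [dval] <;> decide
    · have hK1 : 1 ≤ K := by omega
      rw [List.range_succ_eq_map]
      simp only [List.map_cons, List.map_map, List.reverse_cons]
      have hshift : ∀ j : Nat, m / 2 ^ (j + 1) = (m / 2) / 2 ^ j := by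
        intro j; rw [pow_succ, Nat.div_div_eq_div_mul]; ring_nf
      have hmap : (List.range K).map ((fun j => ((m / 2 ^ j % 2 : Nat) : Int)) ∘ (· + 1))
          = (List.range K).map (fun j => (((m / 2) / 2 ^ j % 2 : Nat) : Int)) := by
        apply List.map_congr_left; intro j _; simp [Function.comp, hshift j]
      rw [hmap, ih (m / 2) hK1 (by omega)]
      have hpz : m / 2 ^ 0 % 2 = m % 2 := by simp
      rw [hpz]
      by_cases h2 : m < 2
      · have hm20 : m / 2 = 0 := by omega
        have hb0 : binDig 0 = ['0'] := by rw [binDig]; decide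
        conv_rhs => rw [binDig, if_pos h2]
        rw [hm20, hb0]
        have hmm : m % 2 = m := by omega
        have hd0 : dval '0' = 0 := by decide
        simp only [List.map_cons, List.map_nil, hd0, List.length_cons, List.length_nil,
          dval_digitChar m h2, hmm]
        have hrep : List.replicate (K - 1) (0:Int) ++ [0] = List.replicate K 0 := by
          have hKe : K = (K - 1) + 1 := by omega
          rw [hKe, List.replicate_succ']; simp
        rw [List.append_assoc, ← List.append_assoc]
        rw [hrep]
        simp
      · conv_rhs => rw [binDig, if_neg h2]
        simp only [List.length_append, List.length_cons, List.length_nil, List.map_append,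
          List.map_cons, List.map_nil, dval_digitChar (m % 2) (by omega)]
        have hlen : K + 1 - ((binDig (m / 2)).length + 0 + 1) = K - (binDig (m / 2)).length := by
          omega
        rw [hlen, List.append_assoc]

-- generic loop shapes
theorem foldl_prepend {α β : Type} (l : List α) (g : α → β) : ∀ (start : List β),
    l.foldl (fun bin k => g k :: bin) start = (l.map g).reverse ++ start := by
  induction l with
  | nil => intro start; rfl
  | cons a l ih => intro start; simp [ih]

theorem foldl_iterate {α β : Type} (l : List α) (g : β → β) : ∀ (st : β),
    l.foldl (fun s _ => g s) st = g^[l.length] st := by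
  induction l with
  | nil => intro st; rfl
  | cons a l ih => intro st; simp [ih, Function.iterate_succ_apply]

theorem iterB : ∀ (k : Nat) (xs : List Int) (m0 : Int),
    (fun st : List Int × Int => (st.1 ++ [PySem.Int.band st.2 1], st.2 >>> (1 : Nat)))^[k] (xs, m0)
      = (xs ++ (List.range k).map (fun (j : Nat) => PySem.Int.band (m0 >>> j) 1), m0 >>> k) := by
  intro k
  induction k with
  | zero => intro xs m0; simp
  | succ k ih =>
    intro xs m0
    rw [Function.iterate_succ_apply, ih]
    rw [List.range_succ_eq_map]
    simp only [List.map_cons, List.map_map, Prod.mk.injEq]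
    constructor
    · rw [List.append_assoc]
      congr 1
      simp only [List.singleton_append]
      congr 1
      · rw [Int.shiftRight_zero]
      · apply List.map_congr_left
        intro j _
        simp only [Function.comp]
        rw [← Int.shiftRight_add]
        have hj : (1:Nat) + j = j + 1 := by omega
        rw [hj]
    · rw [← Int.shiftRight_add, Nat.add_comm]

theorem band_mask_nonneg (n : Int) (t : Nat) : 0 ≤ PySem.Int.band n ((2:Int) ^ t - 1) := by
  have hp : (0:Int) < 2 ^ t := pow_pos (by norm_num) t
  rw [PySem.Int.band_comm]
  exact PySem.Int.band_nonneg_of_nonneg_left n (by omega)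

theorem band_mask_lt (n : Int) (t : Nat) :
    (PySem.Int.band n ((2:Int) ^ t - 1)).toNat < 2 ^ t := by
  have hcast : ((2 ^ t : Nat) : Int) = (2:Int) ^ t := by push_cast; ring
  have hp : (0:Nat) < 2 ^ t := Nat.pow_pos (by norm_num : 0 < 2)
  have hmt : ((2:Int) ^ t - 1).toNat = 2 ^ t - 1 := by omega
  rw [PySem.Int.band]
  split_ifs with h1 h2 h2
  · simp only [Int.toNat_natCast, hmt]
    rw [Nat.and_two_pow_sub_one_eq_mod]
    exact Nat.mod_lt _ hp
  · exfalso; omega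
  · simp only [Int.toNat_natCast, hmt]
    have := Nat.sub_le (2 ^ t - 1) ((2 ^ t - 1) &&& (-n - 1).toNat)
    omega
  · exfalso; omega

theorem toBinChars0b_nonneg (m : Int) (h : 0 ≤ m) :
    PySem.Int.toBinChars0b m = '0' :: 'b' :: binDig m.toNat := by
  rw [PySem.Int.toBinChars0b, if_neg (by omega), toDigits_eq_binDig]

theorem parseBin2_roundtrip (m : Int) (h : 0 ≤ m) :
    parseBin2 (PySem.Int.toBinChars0b m) = m := by
  rw [toBinChars0b_nonneg m h, parseBin2]
  simp only [List.drop_succ_cons, List.drop_zero]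
  rw [parse_binDig]
  simp [Int.toNat_of_nonneg h]

-- characterization of port A (width ≥ 0)
theorem A_char (n width : Int) (h : 0 ≤ width) :
    int_to_bits n width
      = List.replicate
          (width - ((binDig (PySem.Int.band n ((2:Int) ^ width.toNat - 1)).toNat).length : Int)).toNat 0
        ++ (binDig (PySem.Int.band n ((2:Int) ^ width.toNat - 1)).toNat).map dval := by
  have hp : (0:Int) < 2 ^ width.toNat := pow_pos (by norm_num) _
  have hmask : (0:Int) ≤ 2 ^ width.toNat - 1 := by omega
  rw [int_to_bits]
  rw [parseBin2_roundtrip _ hmask]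
  set m := PySem.Int.band n ((2:Int) ^ width.toNat - 1) with hmdef
  have hm0 : 0 ≤ m := band_mask_nonneg n width.toNat
  rw [toBinChars0b_nonneg m hm0]
  set ds := binDig m.toNat with hds
  have hlen : ((('0' :: 'b' :: ds).length : Int) - 2) = (ds.length : Int) := by
    simp; ring
  rw [hlen]
  -- the insert(0, …) loop prepends, so it builds the reversed digit list
  simp only [PySem.List.insert_zero]
  rw [foldl_prepend]
  rw [List.append_nil]
  have hmapA : (PySem.List.pyRange 0 (ds.length : Int) 1).map
        (fun i => (PySem.Int.ofChars? [(PySem.List.pyGet? ('0' :: 'b' :: ds) (i + 2)).getD '0']).getD 0)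
      = ds.map dval := by
    rw [PySem.List.pyRange_one]
    rw [List.map_map]
    apply List.ext_getElem
    · simp
    · intro i h1 h2
      simp only [List.getElem_map, List.getElem_range, Function.comp]
      have hi : i < ds.length := by simpa using h2
      have hcast : (0 : Int) + (i : Int) + 2 = ((i + 2 : Nat) : Int) := by push_cast; ring
      rw [hcast, PySem.List.pyGet?_natCast]
      simp [List.getElem?_cons_succ, List.getElem?_eq_getElem hi, dval]
  rw [hmapA]
  simp [List.length_map]

-- characterization of port B (width ≥ 0)
theorem B_char (n width : Int) (h : 0 ≤ width) :
    int_to_bits_alt n width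
      = ((List.range width.toNat).map
          (fun j => (((PySem.Int.band n ((2:Int) ^ width.toNat - 1)).toNat / 2 ^ j % 2 : Nat) : Int))).reverse := by
  rw [int_to_bits_alt]
  set m := PySem.Int.band n ((2:Int) ^ width.toNat - 1) with hmdef
  have hm0 : 0 ≤ m := band_mask_nonneg n width.toNat
  rw [PySem.List.pyRange_one]
  rw [foldl_iterate]
  simp only [List.length_map, List.length_range]
  have : (width - 0).toNat = width.toNat := by omega
  rw [this, iterB]
  simp only [List.nil_append]
  congr 1
  apply List.map_congr_left
  intro j _
  have hmc : m = ((m.toNat : Nat) : Int) := by omega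
  rw [hmc]
  have h1 : ((m.toNat : Nat) : Int) >>> j = ((m.toNat >>> j : Nat) : Int) := rfl
  rw [h1]
  have h2 : PySem.Int.band ((m.toNat >>> j : Nat) : Int) 1 = ((m.toNat >>> j &&& 1 : Nat) : Int) := by
    exact_mod_cast PySem.Int.band_natCast (m.toNat >>> j) 1
  rw [h2, Nat.and_one_is_mod, Nat.shiftRight_eq_div_pow]
  simp

-- ===== VERDICT (by name: the statements are the Claim_ definitions above) =====
theorem int_to_bits_spec : Claim_unchanged_int_to_bits := by
  intro n width _ hpre hnD
  unfold D_int_to_bits at hnD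
  have hw : 0 ≤ width := hpre
  have hw1 : 1 ≤ width := by
    rcases lt_or_eq_of_le hw with h | h
    · omega
    · exact absurd h.symm hnD
  have hK1 : 1 ≤ width.toNat := by omega
  have hlt : (PySem.Int.band n ((2:Int) ^ width.toNat - 1)).toNat < 2 ^ width.toNat :=
    band_mask_lt n width.toNat
  have hmain := main_bits width.toNat
    (PySem.Int.band n ((2:Int) ^ width.toNat - 1)).toNat hK1 hlt
  rw [A_char n width hw, B_char n width hw, hmain]
  have hL1 : 1 ≤ (binDig (PySem.Int.band n ((2:Int) ^ width.toNat - 1)).toNat).length :=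
    one_le_binDig_length _
  have hLK : (binDig (PySem.Int.band n ((2:Int) ^ width.toNat - 1)).toNat).length
      ≤ width.toNat := by
    have hlenmain := congrArg List.length hmain
    simp at hlenmain
    omega
  congr 2
  omega

theorem int_to_bits_changed : Claim_changed_int_to_bits := by
  unfold Claim_changed_int_to_bits; decide

theorem int_to_bits_tight : Claim_exact_int_to_bits := by
  intro n width _ _ hD
  unfold D_int_to_bits at hD
  subst hD
  have hA : int_to_bits n 0
      = List.replicate ((0:Int) - ((binDig (PySem.Int.band n ((2:Int) ^ (0:Int).toNat - 1)).toNat).length : Int)).toNat 0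
        ++ (binDig (PySem.Int.band n ((2:Int) ^ (0:Int).toNat - 1)).toNat).map dval :=
    A_char n 0 le_rfl
  have hB : int_to_bits_alt n 0 = [] := by
    rw [B_char n 0 le_rfl]; simp
  rw [hA, hB]
  have hne : (binDig (PySem.Int.band n ((2:Int) ^ (0:Int).toNat - 1)).toNat).map dval ≠ [] := by
    have h1 := one_le_binDig_length (PySem.Int.band n ((2:Int) ^ (0:Int).toNat - 1)).toNat
    intro h
    have := congrArg List.length h
    simp only [List.length_map, List.length_nil] at this
    omega
  exact List.append_ne_nil_of_right_ne_nil _ hne
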